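-- pv_equiv track=rewrite | github.com/Krish-Kothari/sentry | krish12.py | swap_first_last
-- ===== SOURCE A (Python) =====
-- def swap_first_last(num):
--     t=num
--     if num<10:
--         return(num)
--     g=1
--     d=num%10
--     while t>=10:
--         t//=10
--         g*=10
--     fd=num//g
--     if d==fd:
--         return(num)
--     nofl=(num%g)//10
--     return((d*g)+nofl*10+fd)
-- ===== SOURCE B (Python) =====
-- def swap_first_last(num):
--     if num < 10:
--         return num
--     digits = []
--     t = num
--     while t:
--         digits.append(t % 10)
--         t //= 10
--     digits[0], digits[-1] = digits[-1], digits[0]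
--     out = 0
--     for dd in reversed(digits):
--         out = out * 10 + dd
--     return out
-- ===== Notes on version B (the rewrite author's own statement) =====
-- stated objective: alternative
-- what changed: Replaces the magnitude-counting loop plus modular recombination (num//g, num%g, d*g+nofl*10+fd) with a digit-list algorithm: extract the decimal digits into a list, swap its first and last entries, and rebuild the number by Horner evaluation.
import Mathlib
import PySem

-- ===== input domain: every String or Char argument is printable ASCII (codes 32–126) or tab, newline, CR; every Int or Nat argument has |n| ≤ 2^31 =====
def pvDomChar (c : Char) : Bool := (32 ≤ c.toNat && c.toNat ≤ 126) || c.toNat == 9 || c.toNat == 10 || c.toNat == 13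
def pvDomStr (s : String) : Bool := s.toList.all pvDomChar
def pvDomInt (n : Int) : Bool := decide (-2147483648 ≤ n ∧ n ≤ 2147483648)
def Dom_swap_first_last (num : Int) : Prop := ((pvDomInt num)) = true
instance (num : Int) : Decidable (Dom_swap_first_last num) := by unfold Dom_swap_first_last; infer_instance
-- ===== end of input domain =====

-- B swaps the first and last decimal digit by extracting the digit list, swapping its ends and
-- rebuilding with Horner evaluation, instead of A's magnitude loop plus modular recombination.

-- ===== PORT A =====
-- A's while loop `while t>=10: t//=10; g*=10`; returns the final g (the final t is unused by A)
def pvLoopA (t g : Int) : Int :=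
  if 10 ≤ t then pvLoopA (PySem.Int.floordiv t 10) (g * 10) else g
termination_by t.toNat
decreasing_by
  simp only [PySem.Int.floordiv_eq_ediv_of_pos (by norm_num : (0:Int) < 10)]
  omega

def swap_first_last (num : Int) : Int :=
  let t := num
  if num < 10 then num
  else
    let d := PySem.Int.mod num 10
    let g := pvLoopA t 1
    let fd := PySem.Int.floordiv num g
    if d = fd then num
    else
      let nofl := PySem.Int.floordiv (PySem.Int.mod num g) 10
      d * g + nofl * 10 + fd

-- ===== PORT B =====
-- B's digit loop `while t: digits.append(t % 10); t //= 10`; here t starts ≥ 10 and stays ≥ 0,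
-- so Python's truthiness test `while t:` is exactly `0 < t` on every reachable state
def pvDigitsB (t : Int) (digits : List Int) : List Int :=
  if 0 < t then pvDigitsB (PySem.Int.floordiv t 10) (digits ++ [PySem.Int.mod t 10]) else digits
termination_by t.toNat
decreasing_by
  simp only [PySem.Int.floordiv_eq_ediv_of_pos (by norm_num : (0:Int) < 10)]
  omega

def swap_first_last_alt (num : Int) : Int :=
  if num < 10 then num
  else
    let digits := pvDigitsB num []
    -- digits is nonempty here (num ≥ 10), so the Python indexing cannot raise; pyGetD/pySetD are exact
    let a := PySem.List.pyGetD digits (-1) 0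
    let b := PySem.List.pyGetD digits 0 0
    let digits := PySem.List.pySetD digits 0 a
    let digits := PySem.List.pySetD digits (-1) b
    digits.reverse.foldl (fun out dd => out * 10 + dd) 0

-- ===== PRECONDITION & SPEC =====
def Spec_swap_first_last (num : Int) (out : Int) : Prop := out = swap_first_last_alt num
instance (num : Int) (out : Int) : Decidable (Spec_swap_first_last num out) := by unfold Spec_swap_first_last; infer_instance

-- ===== CLAIM (what is proved, stated in full; the proofs are below) =====
def Claim_equal_swap_first_last : Prop := ∀ (num : Int), Dom_swap_first_last num → Spec_swap_first_last num (swap_first_last num)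

-- ===== LEMMAS AND PROOFS =====

lemma pvDigitsB_eq (n : ℕ) : ∀ (acc : List Int),
    pvDigitsB (n : Int) acc = acc ++ (Nat.digits 10 n).map (fun d : ℕ => (d : Int)) := by
  induction n using Nat.strong_induction_on with
  | _ n ih =>
    intro acc
    rw [pvDigitsB]
    by_cases h : 0 < n
    · rw [if_pos (by exact_mod_cast h)]
      have hfd : PySem.Int.floordiv (n : Int) 10 = ((n / 10 : ℕ) : Int) := by
        exact_mod_cast PySem.Int.floordiv_natCast n 10
      have hmd : PySem.Int.mod (n : Int) 10 = ((n % 10 : ℕ) : Int) := by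
        exact_mod_cast PySem.Int.mod_natCast n 10
      rw [hfd, hmd, ih (n / 10) (Nat.div_lt_self h (by norm_num)),
        Nat.digits_def' (by norm_num : (1:ℕ) < 10) h]
      simp
    · have h0 : n = 0 := by omega
      subst h0
      simp

lemma pvLoopA_eq (n : ℕ) : ∀ (g : Int), 0 < n →
    pvLoopA (n : Int) g = g * 10 ^ ((Nat.digits 10 n).length - 1) := by
  induction n using Nat.strong_induction_on with
  | _ n ih =>
    intro g hn
    rw [pvLoopA]
    by_cases h : 10 ≤ n
    · rw [if_pos (by exact_mod_cast h)]
      have hfd : PySem.Int.floordiv (n : Int) 10 = ((n / 10 : ℕ) : Int) := by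
        exact_mod_cast PySem.Int.floordiv_natCast n 10
      rw [hfd, ih (n / 10) (Nat.div_lt_self hn (by norm_num)) (g * 10) (by omega)]
      have hne : Nat.digits 10 (n / 10) ≠ [] := Nat.digits_ne_nil_iff_ne_zero.mpr (by omega)
      have hk : 1 ≤ (Nat.digits 10 (n / 10)).length := List.length_pos_of_ne_nil hne
      rw [Nat.digits_def' (by norm_num : (1:ℕ) < 10) (by omega : 0 < n), List.length_cons,
        Nat.add_sub_cancel]
      set k := (Nat.digits 10 (n / 10)).length with hkdef
      have hk1 : k - 1 + 1 = k := by omega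
      calc g * 10 * 10 ^ (k - 1) = g * (10 ^ (k - 1) * 10) := by ring
        _ = g * 10 ^ (k - 1 + 1) := by rw [pow_succ]
        _ = g * 10 ^ k := by rw [hk1]
    · rw [if_neg (by exact_mod_cast h)]
      have h1 : (Nat.digits 10 n).length ≤ 1 :=
        (Nat.digits_length_le_iff (by norm_num) n).mpr (by omega)
      have h2 : Nat.digits 10 n ≠ [] := Nat.digits_ne_nil_iff_ne_zero.mpr (by omega)
      have h3 : 1 ≤ (Nat.digits 10 n).length := List.length_pos_of_ne_nil h2
      have : (Nat.digits 10 n).length = 1 := by omega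
      rw [this]
      simp

lemma horner_rev (l : List ℕ) (a : Int) :
    ((l.map (fun d : ℕ => (d : Int))).reverse).foldl (fun out dd => out * 10 + dd) a
      = a * 10 ^ l.length + ((Nat.ofDigits 10 l : ℕ) : Int) := by
  induction l generalizing a with
  | nil => simp
  | cons d l ih =>
    rw [List.map_cons, List.reverse_cons, List.foldl_append, ih, Nat.ofDigits_cons]
    simp only [List.foldl_cons, List.foldl_nil, List.length_cons]
    push_cast
    ring

lemma pySetD_append_neg_one (xs : List Int) (x v : Int) :
    PySem.List.pySetD (xs ++ [x]) (-1) v = xs ++ [v] := by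
  simp [PySem.List.pySetD, PySem.List.pySet?, PySem.List.pyIdx?]

lemma pySetD_zero_cons (x v : Int) (xs : List Int) :
    PySem.List.pySetD (x :: xs) 0 v = v :: xs := by
  simp [PySem.List.pySetD, PySem.List.pySet?, PySem.List.pyIdx?]

lemma main_eq (N : ℕ) (hN : 10 ≤ N) :
    swap_first_last (N : Int) = swap_first_last_alt (N : Int) := by
  have hlt : ¬ ((N : Int) < 10) := by exact_mod_cast not_lt.mpr hN
  -- decompose the digit list of N as d0 :: mid ++ [dl]
  have hlen2 : 2 ≤ (Nat.digits 10 N).length := by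
    have := (Nat.lt_digits_length_iff (b := 10) (k := 1) (by norm_num) N).mpr (by simpa using hN)
    omega
  obtain ⟨d0, rest, hds⟩ : ∃ d0 rest, Nat.digits 10 N = d0 :: rest := by
    rcases h : Nat.digits 10 N with _ | ⟨a, r⟩
    · rw [h] at hlen2; simp at hlen2
    · exact ⟨a, r, rfl⟩
  have hrest : rest ≠ [] := by
    intro h; rw [h] at hds; rw [hds] at hlen2; simp at hlen2
  obtain ⟨mid, dl, hrest2⟩ : ∃ mid dl, rest = mid ++ [dl] :=
    ⟨rest.dropLast, rest.getLast hrest, (List.dropLast_append_getLast hrest).symm⟩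
  have hNval : N = d0 + 10 * (Nat.ofDigits 10 mid + 10 ^ mid.length * dl) := by
    conv_lhs => rw [← Nat.ofDigits_digits 10 N]
    rw [hds, hrest2, Nat.ofDigits_cons, Nat.ofDigits_append, Nat.ofDigits_singleton]
  have hL : (Nat.digits 10 N).length = mid.length + 2 := by
    rw [hds, hrest2]; simp
  have hd0lt : d0 < 10 := by
    refine Nat.digits_lt_base (by norm_num) (m := N) ?_
    rw [hds]; exact List.mem_cons_self
  have hMlt : Nat.ofDigits 10 mid < 10 ^ mid.length := by
    refine Nat.ofDigits_lt_base_pow_length (by norm_num) ?_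
    intro x hx
    refine Nat.digits_lt_base (by norm_num) (m := N) ?_
    rw [hds, hrest2]
    exact List.mem_cons_of_mem _ (List.mem_append_left _ hx)
  have hP : (0:ℕ) < 10 ^ (mid.length + 1) := by positivity
  have hNval' : N = (d0 + 10 * Nat.ofDigits 10 mid) + 10 ^ (mid.length + 1) * dl := by
    rw [hNval]; ring
  have hsm : d0 + 10 * Nat.ofDigits 10 mid < 10 ^ (mid.length + 1) := by
    have h1 : (10:ℕ) ^ (mid.length + 1) = 10 * 10 ^ mid.length := by ring
    omega
  -- A's intermediate values
  have hdA : PySem.Int.mod (N : Int) 10 = (d0 : Int) := by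
    have h1 : PySem.Int.mod (N : Int) 10 = ((N % 10 : ℕ) : Int) := by
      exact_mod_cast PySem.Int.mod_natCast N 10
    have h2 : N % 10 = d0 := by omega
    rw [h1, h2]
  have hg : pvLoopA (N : Int) 1 = ((10 ^ (mid.length + 1) : ℕ) : Int) := by
    rw [pvLoopA_eq N 1 (by omega), hL]
    push_cast
    ring
  have hdivP : N / 10 ^ (mid.length + 1) = dl := by
    rw [hNval', Nat.add_mul_div_left _ _ hP, Nat.div_eq_of_lt hsm, Nat.zero_add]
  have hmodP : N % 10 ^ (mid.length + 1) = d0 + 10 * Nat.ofDigits 10 mid := by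
    rw [hNval', Nat.add_mul_mod_self_left, Nat.mod_eq_of_lt hsm]
  have hfdA : PySem.Int.floordiv (N : Int) ((10 ^ (mid.length + 1) : ℕ) : Int) = (dl : Int) := by
    have h1 := PySem.Int.floordiv_natCast N (10 ^ (mid.length + 1))
    rw [h1, hdivP]
  have hmodA : PySem.Int.mod (N : Int) ((10 ^ (mid.length + 1) : ℕ) : Int)
      = ((d0 + 10 * Nat.ofDigits 10 mid : ℕ) : Int) := by
    have h1 := PySem.Int.mod_natCast N (10 ^ (mid.length + 1))
    rw [h1, hmodP]
  have hnoflA : PySem.Int.floordiv ((d0 + 10 * Nat.ofDigits 10 mid : ℕ) : Int) 10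
      = ((Nat.ofDigits 10 mid : ℕ) : Int) := by
    have h1 : PySem.Int.floordiv ((d0 + 10 * Nat.ofDigits 10 mid : ℕ) : Int) ((10:ℕ) : Int)
        = (((d0 + 10 * Nat.ofDigits 10 mid) / 10 : ℕ) : Int) := PySem.Int.floordiv_natCast _ 10
    have h2 : (d0 + 10 * Nat.ofDigits 10 mid) / 10 = Nat.ofDigits 10 mid := by omega
    have h3 : ((10:ℕ) : Int) = (10 : Int) := by norm_num
    rw [h3] at h1
    rw [h1, h2]
  -- B's digit list and its swap
  have hdigs : pvDigitsB (N : Int) []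
      = ((d0 : Int) :: mid.map (fun d : ℕ => (d : Int))) ++ [(dl : Int)] := by
    rw [pvDigitsB_eq N [], hds, hrest2]
    simp
  -- evaluate both sides
  rw [swap_first_last, swap_first_last_alt, if_neg hlt, if_neg hlt]
  simp only [hdigs, hdA, hg, hfdA, hmodA, hnoflA,
    PySem.List.pyGetD_neg_one_append_singleton]
  have hgetB : PySem.List.pyGetD (((d0 : Int) :: mid.map (fun d : ℕ => (d : Int))) ++ [(dl : Int)]) 0 0
      = (d0 : Int) := by
    rw [List.cons_append]
    exact PySem.List.pyGetD_zero_cons ..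
  have hset0 : PySem.List.pySetD (((d0 : Int) :: mid.map (fun d : ℕ => (d : Int))) ++ [(dl : Int)]) 0 (dl : Int)
      = (((dl : Int) :: mid.map (fun d : ℕ => (d : Int))) ++ [(dl : Int)]) := by
    rw [List.cons_append, pySetD_zero_cons, List.cons_append]
  rw [hgetB, hset0, List.cons_append, ← List.cons_append, pySetD_append_neg_one]
  have hBlist : ((dl : Int) :: mid.map (fun d : ℕ => (d : Int))) ++ [(d0 : Int)]
      = (dl :: (mid ++ [d0])).map (fun d : ℕ => (d : Int)) := by
    simp
  rw [hBlist, horner_rev]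
  rw [Nat.ofDigits_cons, Nat.ofDigits_append, Nat.ofDigits_singleton]
  by_cases hcase : (d0 : Int) = (dl : Int)
  · rw [if_pos hcase]
    have heq : d0 = dl := by exact_mod_cast hcase
    subst heq
    rw [hNval]
    push_cast
    ring
  · rw [if_neg hcase]
    push_cast
    ring

-- ===== VERDICT (by name: the statement is the Claim_ definition above) =====
theorem swap_first_last_spec : Claim_equal_swap_first_last := by
  intro num _
  unfold Spec_swap_first_last
  by_cases h : num < 10
  · simp [swap_first_last, swap_first_last_alt, h]
  · have h10 : 10 ≤ num.toNat := by omega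
    have hnum : num = (num.toNat : Int) := by omega
    rw [hnum]
    exact main_eq num.toNat h10
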